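-- pv_equiv track=rewrite | github.com/inxm-ai/enterprise-mcp-bridge | app/tgi/clients/llm_client.py | _preferred_type_from_union
-- ===== SOURCE A (Python) =====
-- from typing import Any, AsyncGenerator, Dict, List, Optional, Tuple
--
-- def _preferred_type_from_union(values: List[Any]) -> Optional[str]:
--     normalized: List[str] = []
--     for value in values:
--         if isinstance(value, str) and value.strip():
--             normalized.append(value.strip())
--     if not normalized:
--         return None
--
--     preferred_order = (
--         "object",
--         "array",
--         "string",
--         "number",
--         "integer",
--         "boolean",
--         "null",
--     )
--     for candidate in preferred_order:
--         if candidate in normalized: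
--             return candidate
--     return normalized[0]
-- ===== SOURCE B (Python) =====
-- def _preferred_type_from_union(values):
--     normalized = []
--     for value in values:
--         if isinstance(value, str) and value.strip():
--             normalized.append(value.strip())
--     if not normalized:
--         return None
--
--     rank = {
--         "object": 0,
--         "array": 1,
--         "string": 2,
--         "number": 3,
--         "integer": 4,
--         "boolean": 5,
--         "null": 6,
--     }
--     best = None
--     best_rank = 7
--     for v in normalized:
--         r = rank.get(v, 7)
--         if r < best_rank:
--             best_rank = r
--             best = v
--     return best if best is not None else normalized[0]
-- ===== Notes on version B (the rewrite author's own statement) =====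
-- stated objective: alternative
-- what changed: A scans the fixed 7-element priority tuple and tests list membership for each candidate; B instead makes a single pass over the normalized values with a rank-lookup dictionary, keeping the element of minimum rank and falling back to normalized[0] when none is preferred.
import Mathlib
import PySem

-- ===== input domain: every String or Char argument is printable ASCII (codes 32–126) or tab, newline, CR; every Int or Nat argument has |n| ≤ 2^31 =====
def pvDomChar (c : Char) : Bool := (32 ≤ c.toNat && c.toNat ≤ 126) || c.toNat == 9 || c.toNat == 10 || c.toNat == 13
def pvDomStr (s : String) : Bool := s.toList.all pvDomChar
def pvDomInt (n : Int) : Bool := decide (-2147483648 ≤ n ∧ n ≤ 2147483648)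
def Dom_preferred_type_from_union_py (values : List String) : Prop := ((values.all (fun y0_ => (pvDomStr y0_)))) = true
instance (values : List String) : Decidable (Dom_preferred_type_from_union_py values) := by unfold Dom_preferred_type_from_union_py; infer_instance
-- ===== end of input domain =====

-- B (alternative decomposition, same cost class): instead of A's scan over the 7-element
-- priority tuple with a list-membership test per candidate, B makes one pass over the
-- normalized data with a rank-dictionary lookup, keeping the minimum-rank element;
-- the normalization pass and the normalized[0] fallback are the same.

-- ===== PORT A =====
-- the normalization loop both Pythons contain verbatim (collect stripped non-empty strings)
def pvNormalize (values : List String) : List String :=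
  values.foldl (fun acc value =>
    if PySem.Str.strip value ≠ "" then acc ++ [PySem.Str.strip value] else acc) []

-- A's 'for candidate in preferred_order: if candidate in normalized: return candidate'
def pvScanA (cands : List String) (normalized : List String) : Option String :=
  match cands with
  | [] => PySem.List.pyGet? normalized 0        -- return normalized[0]
  | c :: rest => if normalized.contains c then some c else pvScanA rest normalized

def preferred_type_from_union_py (values : List String) : Option String :=
  let normalized := pvNormalize values
  if normalized = [] then none
  else pvScanA ["object", "array", "string", "number", "integer", "boolean", "null"] normalized

-- ===== PORT B =====
def pvRankDict : PySem.Dict String Int :=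
  PySem.Dict.mk [("object", 0), ("array", 1), ("string", 2), ("number", 3),
                 ("integer", 4), ("boolean", 5), ("null", 6)]

def preferred_type_from_union_py_alt (values : List String) : Option String :=
  let normalized := pvNormalize values
  if normalized = [] then none
  else
    let st := normalized.foldl (fun (st : Option String × Int) v =>
      let r := PySem.Dict.getD pvRankDict v 7
      if r < st.2 then (some v, r) else st) (none, 7)
    match st.1 with
    | some b => some b
    | none => PySem.List.pyGet? normalized 0    -- no preferred type present: normalized[0]

-- ===== PRECONDITION & SPEC =====
def Spec_preferred_type_from_union_py (values : List String) (out : Option String) : Prop := out = preferred_type_from_union_py_alt values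
instance (values : List String) (out : Option String) : Decidable (Spec_preferred_type_from_union_py values out) := by unfold Spec_preferred_type_from_union_py; infer_instance

-- ===== CLAIM (what is proved, stated in full; the proofs are below) =====
def Claim_equal_preferred_type_from_union_py : Prop := ∀ (values : List String), Dom_preferred_type_from_union_py values → Spec_preferred_type_from_union_py values (preferred_type_from_union_py values)

-- ===== LEMMAS AND PROOFS =====

def pvRank (v : String) : Int :=
  if "object" = v then 0 else if "array" = v then 1 else if "string" = v then 2 else
  if "number" = v then 3 else if "integer" = v then 4 else if "boolean" = v then 5 else
  if "null" = v then 6 else 7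
theorem pvRank_eq (v : String) : PySem.Dict.getD pvRankDict v 7 = pvRank v := by
  simp only [pvRankDict, PySem.Dict.getD, PySem.Dict.get?_mk_cons, beq_iff_eq, pvRank]
  split_ifs <;> rfl
def pvPref : List String := ["object", "array", "string", "number", "integer", "boolean", "null"]
def pvPick (r : Int) : Option String :=
  if r = 0 then some "object" else if r = 1 then some "array" else if r = 2 then some "string" else
  if r = 3 then some "number" else if r = 4 then some "integer" else if r = 5 then some "boolean" else
  if r = 6 then some "null" else none
def pvMfold (l : List String) (r : Int) : Int := l.foldl (fun m v => min m (pvRank v)) r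
theorem pvRank_nonneg (v : String) : 0 ≤ pvRank v := by unfold pvRank; split_ifs <;> norm_num
theorem pvPick_rank (v : String) (h : pvRank v < 7) : pvPick (pvRank v) = some v := by
  by_cases h1 : "object" = v
  · subst h1; decide
  by_cases h2 : "array" = v
  · subst h2; decide
  by_cases h3 : "string" = v
  · subst h3; decide
  by_cases h4 : "number" = v
  · subst h4; decide
  by_cases h5 : "integer" = v
  · subst h5; decide
  by_cases h6 : "boolean" = v
  · subst h6; decide
  by_cases h7 : "null" = v
  · subst h7; decide
  exfalso; simp [pvRank, h1, h2, h3, h4, h5, h6, h7] at h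
theorem pvMfold_cons (v : String) (t : List String) (r : Int) :
    pvMfold (v :: t) r = pvMfold t (min r (pvRank v)) := rfl
theorem pvFoldB' (l : List String) (r : Int) (hr : r ≤ 7) :
    l.foldl (fun (st : Option String × Int) v =>
      if pvRank v < st.2 then (some v, pvRank v) else st) (pvPick r, r)
    = (pvPick (pvMfold l r), pvMfold l r) := by
  induction l generalizing r with
  | nil => simp [pvMfold]
  | cons v t ih =>
    rw [List.foldl_cons, pvMfold_cons]
    by_cases hlt : pvRank v < r
    · have hmin : min r (pvRank v) = pvRank v := by omega
      have hv7 : pvRank v < 7 := by omega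
      rw [if_pos hlt, hmin, ← pvPick_rank v hv7]
      exact ih (pvRank v) (by omega)
    · have hmin : min r (pvRank v) = r := by omega
      rw [if_neg hlt, hmin]
      exact ih r hr
theorem pvFoldB (l : List String) :
    l.foldl (fun (st : Option String × Int) v =>
      let q := PySem.Dict.getD pvRankDict v 7
      if q < st.2 then (some v, q) else st) (none, 7)
    = (pvPick (pvMfold l 7), pvMfold l 7) := by
  have h := pvFoldB' l 7 (by norm_num)
  simp only [pvRank_eq]
  simpa [pvPick] using h
theorem pvMfold_le_init (l : List String) (r : Int) : pvMfold l r ≤ r := by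
  induction l generalizing r with
  | nil => simp [pvMfold]
  | cons v t ih =>
    rw [pvMfold_cons]
    have := ih (min r (pvRank v)); omega
theorem pvMfold_nonneg (l : List String) (r : Int) (hr : 0 ≤ r) : 0 ≤ pvMfold l r := by
  induction l generalizing r with
  | nil => simpa [pvMfold]
  | cons v t ih =>
    rw [pvMfold_cons]
    exact ih _ (by have := pvRank_nonneg v; omega)
theorem pvMfold_le (l : List String) (r : Int) (v : String) (hv : v ∈ l) :
    pvMfold l r ≤ pvRank v := by
  induction l generalizing r with
  | nil => cases hv
  | cons w t ih =>
    rw [pvMfold_cons]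
    rcases List.mem_cons.mp hv with hv | hv
    · subst hv
      have := pvMfold_le_init t (min r (pvRank v)); omega
    · exact ih _ hv
theorem pvMfold_attain (l : List String) (r : Int) (h : pvMfold l r < r) :
    ∃ v ∈ l, pvRank v = pvMfold l r := by
  induction l generalizing r with
  | nil => simp [pvMfold] at h
  | cons w t ih =>
    rw [pvMfold_cons] at h ⊢
    by_cases ht : pvMfold t (min r (pvRank w)) < min r (pvRank w)
    · obtain ⟨v, hv, hrk⟩ := ih _ ht
      exact ⟨v, List.mem_cons_of_mem _ hv, hrk⟩
    · have hle := pvMfold_le_init t (min r (pvRank w))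
      refine ⟨w, ?_, ?_⟩
      · exact List.mem_cons_self
      · omega

theorem pvScanA_eq (l : List String) :
    pvScanA pvPref l =
      (match pvPick (pvMfold l 7) with
       | some b => some b
       | none => PySem.List.pyGet? l 0) := by
  have hub := pvMfold_le_init l 7
  have hlb := pvMfold_nonneg l 7 (by norm_num)
  by_cases m0 : "object" ∈ l
  · have hki : pvMfold l 7 = 0 := by
      have hub2 := pvMfold_le l 7 _ m0
      rw [show pvRank "object" = 0 by decide] at hub2
      omega
    simp [pvScanA, pvPref, hki, pvPick, m0]
  by_cases m1 : "array" ∈ l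
  · have hki : pvMfold l 7 = 1 := by
      have hub2 := pvMfold_le l 7 _ m1
      rw [show pvRank "array" = 1 by decide] at hub2
      by_contra hne
      obtain ⟨v, hv, hrk⟩ := pvMfold_attain l 7 (by omega)
      have hpick := pvPick_rank v (by omega)
      rw [hrk] at hpick
      set k := pvMfold l 7 with hdef
      have hk0 : 0 ≤ k := hlb
      have hk1 : k < 1 := by omega
      interval_cases k
      simp [pvPick] at hpick; subst hpick
      exact m0 hv
    simp [pvScanA, pvPref, hki, pvPick, m0, m1]
  by_cases m2 : "string" ∈ l
  · have hki : pvMfold l 7 = 2 := by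
      have hub2 := pvMfold_le l 7 _ m2
      rw [show pvRank "string" = 2 by decide] at hub2
      by_contra hne
      obtain ⟨v, hv, hrk⟩ := pvMfold_attain l 7 (by omega)
      have hpick := pvPick_rank v (by omega)
      rw [hrk] at hpick
      set k := pvMfold l 7 with hdef
      have hk0 : 0 ≤ k := hlb
      have hk1 : k < 2 := by omega
      interval_cases k <;> (simp [pvPick] at hpick; subst hpick)
      all_goals first | exact m0 hv | exact m1 hv
    simp [pvScanA, pvPref, hki, pvPick, m0, m1, m2]
  by_cases m3 : "number" ∈ l
  · have hki : pvMfold l 7 = 3 := by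
      have hub2 := pvMfold_le l 7 _ m3
      rw [show pvRank "number" = 3 by decide] at hub2
      by_contra hne
      obtain ⟨v, hv, hrk⟩ := pvMfold_attain l 7 (by omega)
      have hpick := pvPick_rank v (by omega)
      rw [hrk] at hpick
      set k := pvMfold l 7 with hdef
      have hk0 : 0 ≤ k := hlb
      have hk1 : k < 3 := by omega
      interval_cases k <;> (simp [pvPick] at hpick; subst hpick)
      all_goals first | exact m0 hv | exact m1 hv | exact m2 hv
    simp [pvScanA, pvPref, hki, pvPick, m0, m1, m2, m3]
  by_cases m4 : "integer" ∈ l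
  · have hki : pvMfold l 7 = 4 := by
      have hub2 := pvMfold_le l 7 _ m4
      rw [show pvRank "integer" = 4 by decide] at hub2
      by_contra hne
      obtain ⟨v, hv, hrk⟩ := pvMfold_attain l 7 (by omega)
      have hpick := pvPick_rank v (by omega)
      rw [hrk] at hpick
      set k := pvMfold l 7 with hdef
      have hk0 : 0 ≤ k := hlb
      have hk1 : k < 4 := by omega
      interval_cases k <;> (simp [pvPick] at hpick; subst hpick)
      all_goals first | exact m0 hv | exact m1 hv | exact m2 hv | exact m3 hv
    simp [pvScanA, pvPref, hki, pvPick, m0, m1, m2, m3, m4]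
  by_cases m5 : "boolean" ∈ l
  · have hki : pvMfold l 7 = 5 := by
      have hub2 := pvMfold_le l 7 _ m5
      rw [show pvRank "boolean" = 5 by decide] at hub2
      by_contra hne
      obtain ⟨v, hv, hrk⟩ := pvMfold_attain l 7 (by omega)
      have hpick := pvPick_rank v (by omega)
      rw [hrk] at hpick
      set k := pvMfold l 7 with hdef
      have hk0 : 0 ≤ k := hlb
      have hk1 : k < 5 := by omega
      interval_cases k <;> (simp [pvPick] at hpick; subst hpick)
      all_goals first | exact m0 hv | exact m1 hv | exact m2 hv | exact m3 hv | exact m4 hv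
    simp [pvScanA, pvPref, hki, pvPick, m0, m1, m2, m3, m4, m5]
  by_cases m6 : "null" ∈ l
  · have hki : pvMfold l 7 = 6 := by
      have hub2 := pvMfold_le l 7 _ m6
      rw [show pvRank "null" = 6 by decide] at hub2
      by_contra hne
      obtain ⟨v, hv, hrk⟩ := pvMfold_attain l 7 (by omega)
      have hpick := pvPick_rank v (by omega)
      rw [hrk] at hpick
      set k := pvMfold l 7 with hdef
      have hk0 : 0 ≤ k := hlb
      have hk1 : k < 6 := by omega
      interval_cases k <;> (simp [pvPick] at hpick; subst hpick)
      all_goals first | exact m0 hv | exact m1 hv | exact m2 hv | exact m3 hv | exact m4 hv | exact m5 hv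
    simp [pvScanA, pvPref, hki, pvPick, m0, m1, m2, m3, m4, m5, m6]
  have hki : pvMfold l 7 = 7 := by
    by_contra hne
    obtain ⟨v, hv, hrk⟩ := pvMfold_attain l 7 (by omega)
    have hpick := pvPick_rank v (by omega)
    rw [hrk] at hpick
    set k := pvMfold l 7 with hdef
    have hk0 : 0 ≤ k := hlb
    have hk1 : k < 7 := by omega
    interval_cases k <;> (simp [pvPick] at hpick; subst hpick)
    all_goals first | exact m0 hv | exact m1 hv | exact m2 hv | exact m3 hv | exact m4 hv | exact m5 hv | exact m6 hv
  simp [pvScanA, pvPref, hki, pvPick, m0, m1, m2, m3, m4, m5, m6]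

-- ===== VERDICT (by name: the statement is the Claim_ definition above) =====
theorem preferred_type_from_union_py_spec : Claim_equal_preferred_type_from_union_py := by
  intro values _
  unfold Spec_preferred_type_from_union_py preferred_type_from_union_py preferred_type_from_union_py_alt
  by_cases h : pvNormalize values = []
  · simp [h]
  · rw [if_neg h, if_neg h, pvFoldB]
    exact pvScanA_eq (pvNormalize values)
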